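-- pv_equiv track=rewrite | github.com/mrrobotsca/carspace | PlateformApp/test.py | chooseRegColorContour
-- ===== SOURCE A (Python) =====
-- COLOR_REG_GOOD = '#00FFFF' # bleu ciel
--
-- COLOR_REG_LIMIT = '#FFBF00' # yellow
--
-- COLOR_REG_BAD = '#FF0000' #red
--
-- COLOR_TRANSFO_HOVERLABEL2 = '#4C4C4C' #grey nodata
--
-- def chooseRegColorContour(tabinfo):
--     tabcolor = []
--     for info in tabinfo:
--         if info < 20 and info >= 10:
--             tabcolor.append(COLOR_REG_GOOD)
--         if info < 10 and info >= 0: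
--             tabcolor.append(COLOR_TRANSFO_HOVERLABEL2)
--         if info < 30 and info >= 20:
--             tabcolor.append(COLOR_REG_LIMIT)
--         if info < 40 and info >= 30:
--             tabcolor.append(COLOR_REG_BAD)
--     return tabcolor
-- ===== SOURCE B (Python) =====
-- COLOR_REG_GOOD = '#00FFFF' # bleu ciel
-- COLOR_REG_LIMIT = '#FFBF00' # yellow
-- COLOR_REG_BAD = '#FF0000' #red
-- COLOR_TRANSFO_HOVERLABEL2 = '#4C4C4C' #grey nodata
--
-- # Boundaries of the buckets and the color of the interval ending at each boundary;
-- # slot 0 (below 0) and slot 5 (40 and above) carry no color.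
-- _BOUNDS = [0, 10, 20, 30, 40]
-- _SLOT_COLORS = [None, COLOR_TRANSFO_HOVERLABEL2, COLOR_REG_GOOD,
--                 COLOR_REG_LIMIT, COLOR_REG_BAD, None]
--
-- def _bisect_right(a, x):
--     # index of the first element of a strictly greater than x (binary search)
--     lo, hi = 0, len(a)
--     while lo < hi:
--         mid = (lo + hi) // 2
--         if x < a[mid]:
--             hi = mid
--         else:
--             lo = mid + 1
--     return lo
--
-- def chooseRegColorContour(tabinfo):
--     tabcolor = []
--     for info in tabinfo:
--         color = _SLOT_COLORS[_bisect_right(_BOUNDS, info)]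
--         if color is not None:
--             tabcolor.append(color)
--     return tabcolor
-- ===== Notes on version B (the rewrite author's own statement) =====
-- stated objective: alternative
-- what changed: Replaces the four explicit mutually-exclusive range tests with a hand-written binary search (bisect_right) over the five bucket boundaries plus a slot-color table whose below-range and above-range slots hold None and are skipped.
import Mathlib
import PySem

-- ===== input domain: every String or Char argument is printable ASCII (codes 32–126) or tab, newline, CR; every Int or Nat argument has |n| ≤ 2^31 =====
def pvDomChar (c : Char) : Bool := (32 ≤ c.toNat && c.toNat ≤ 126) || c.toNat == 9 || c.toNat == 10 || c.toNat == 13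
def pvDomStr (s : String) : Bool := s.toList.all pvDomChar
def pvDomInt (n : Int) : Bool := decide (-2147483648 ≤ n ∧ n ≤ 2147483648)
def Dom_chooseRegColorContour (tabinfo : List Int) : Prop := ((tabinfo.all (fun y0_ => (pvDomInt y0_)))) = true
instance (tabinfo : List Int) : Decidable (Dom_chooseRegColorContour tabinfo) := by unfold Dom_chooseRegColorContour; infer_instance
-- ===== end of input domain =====

-- B replaces A's four explicit range tests with a hand-written binary search over the bucket
-- boundaries plus a slot-color table (None slots for out-of-range values) — alternative algorithm.

-- ===== PORT A =====
def chooseRegColorContour (tabinfo : List Int) : List String :=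
  tabinfo.foldl (fun tabcolor info =>
    let t1 := if info < 20 ∧ info ≥ 10 then tabcolor ++ ["#00FFFF"] else tabcolor
    let t2 := if info < 10 ∧ info ≥ 0 then t1 ++ ["#4C4C4C"] else t1
    let t3 := if info < 30 ∧ info ≥ 20 then t2 ++ ["#FFBF00"] else t2
    if info < 40 ∧ info ≥ 30 then t3 ++ ["#FF0000"] else t3) []

-- ===== PORT B =====
def pvBounds : List Int := [0, 10, 20, 30, 40]
def pvSlotColors : List (Option String) :=
  [none, some "#4C4C4C", some "#00FFFF", some "#FFBF00", some "#FF0000", none]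

-- the while-loop of _bisect_right; indexing a[mid] always has 0 ≤ mid < len a in Python,
-- so List.getD with an unreachable default 0 is exact
def bisectLoop (a : List Int) (x : Int) (lo hi : Nat) : Nat :=
  if _h : lo < hi then
    let mid := (lo + hi) / 2
    if x < a.getD mid 0 then bisectLoop a x lo mid
    else bisectLoop a x (mid + 1) hi
  else lo
termination_by hi - lo
decreasing_by all_goals omega

def bisectRight (a : List Int) (x : Int) : Nat := bisectLoop a x 0 a.length

-- the 'if color is not None: append' loop
def chooseRegColorContour_alt (tabinfo : List Int) : List String :=
  tabinfo.foldl (fun tabcolor info =>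
    match pvSlotColors.getD (bisectRight pvBounds info) none with
    | some color => tabcolor ++ [color]
    | none => tabcolor) []

-- ===== PRECONDITION & SPEC =====
def Spec_chooseRegColorContour (tabinfo : List Int) (out : List String) : Prop := out = chooseRegColorContour_alt tabinfo
instance (tabinfo : List Int) (out : List String) : Decidable (Spec_chooseRegColorContour tabinfo out) := by unfold Spec_chooseRegColorContour; infer_instance

-- ===== CLAIM (what is proved, stated in full; the proofs are below) =====
def Claim_equal_chooseRegColorContour : Prop := ∀ (tabinfo : List Int), Dom_chooseRegColorContour tabinfo → Spec_chooseRegColorContour tabinfo (chooseRegColorContour tabinfo)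

-- ===== LEMMAS AND PROOFS =====

-- value of the binary search on the concrete boundary list
lemma bisect_val (x : Int) :
    bisectRight pvBounds x =
      if x < 0 then 0 else if x < 10 then 1 else if x < 20 then 2
      else if x < 30 then 3 else if x < 40 then 4 else 5 := by
  unfold bisectRight pvBounds
  simp [bisectLoop]
  split_ifs <;> omega

-- the two loop bodies agree as functions
lemma step_eq (acc : List String) (x : Int) :
    (let t1 := if x < 20 ∧ x ≥ 10 then acc ++ ["#00FFFF"] else acc
     let t2 := if x < 10 ∧ x ≥ 0 then t1 ++ ["#4C4C4C"] else t1
     let t3 := if x < 30 ∧ x ≥ 20 then t2 ++ ["#FFBF00"] else t2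
     if x < 40 ∧ x ≥ 30 then t3 ++ ["#FF0000"] else t3)
    = (match pvSlotColors.getD (bisectRight pvBounds x) none with
       | some color => acc ++ [color]
       | none => acc) := by
  rw [bisect_val]
  by_cases h0 : x < 0
  · simp [pvSlotColors, h0]; split_ifs <;> first | rfl | omega
  · by_cases h1 : x < 10
    · simp only [if_neg h0, if_pos h1, pvSlotColors]
      norm_num; split_ifs <;> first | rfl | omega
    · by_cases h2 : x < 20
      · simp only [if_neg h0, if_neg h1, if_pos h2, pvSlotColors]
        norm_num; split_ifs <;> first | rfl | omega
      · by_cases h3 : x < 30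
        · simp only [if_neg h0, if_neg h1, if_neg h2, if_pos h3, pvSlotColors]
          norm_num; split_ifs <;> first | rfl | omega
        · by_cases h4 : x < 40
          · simp only [if_neg h0, if_neg h1, if_neg h2, if_neg h3, if_pos h4, pvSlotColors]
            norm_num; split_ifs <;> first | rfl | omega
          · simp only [if_neg h0, if_neg h1, if_neg h2, if_neg h3, if_neg h4, pvSlotColors]
            norm_num; split_ifs <;> first | rfl | omega

-- ===== VERDICT (by name: the statement is the Claim_ definition above) =====
theorem chooseRegColorContour_spec : Claim_equal_chooseRegColorContour := by
  intro tabinfo _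
  unfold Spec_chooseRegColorContour chooseRegColorContour chooseRegColorContour_alt
  congr 1
  funext acc x
  exact step_eq acc x
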